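-- pv_equiv track=rewrite | github.com/aylanonsense/legaia-moves | main.py | find_move_suggestion
-- ===== SOURCE A (Python) =====
-- def list_all_moves_leq(move_length, restrictions):
-- 	arr = []
-- 	list_all_moves_leq_recur('', move_length, restrictions, arr)
-- 	return arr
--
-- def list_all_moves_leq_recur(move_so_far, length_to_add, restrictions, arr):
-- 	if len(move_so_far) > 0:
-- 		arr.append(move_so_far)
-- 	if length_to_add > 0:
-- 		if 'u' not in restrictions:
-- 			list_all_moves_leq_recur(move_so_far + 'u', length_to_add - 1, restrictions, arr)
-- 		if 'd' not in restrictions: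
-- 			list_all_moves_leq_recur(move_so_far + 'd', length_to_add - 1, restrictions, arr)
-- 		if 'l' not in restrictions:
-- 			list_all_moves_leq_recur(move_so_far + 'l', length_to_add - 1, restrictions, arr)
-- 		if 'r' not in restrictions:
-- 			list_all_moves_leq_recur(move_so_far + 'r', length_to_add - 1, restrictions, arr)
--
-- def find_move_suggestion(char_moves, move_length, restrictions):
-- 	if 'u' in restrictions and 'd' in restrictions and 'l' in restrictions and 'r' in restrictions:
-- 		return '  No moves possible!'
-- 	best_move = None
-- 	best_score = 0
-- 	all_moves = list_all_moves_leq(move_length, restrictions)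
-- 	for i in range(0, len(all_moves)):
-- 		move = all_moves[i]
-- 		score = 0
-- 		if len(move) == move_length:
-- 			for j in range(0, len(all_moves)):
-- 				move_part = all_moves[j]
-- 				if move_part in move and move_part not in char_moves:
-- 					score += 1
-- 		if score > best_score:
-- 			best_move = move
-- 			best_score = score
-- 	return '  Best move: %s [score: %i]' % (best_move, best_score)
-- ===== SOURCE B (Python) =====
-- def find_move_suggestion(char_moves, move_length, restrictions):
-- 	allowed = [c for c in 'udlr' if c not in restrictions]
-- 	if not allowed:
-- 		return '  No moves possible!'
-- 	known = set(char_moves)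
-- 	best_move = None
-- 	best_score = 0
-- 	if move_length > 0:
-- 		full = ['']
-- 		for _ in range(move_length):
-- 			full = [m + c for m in full for c in allowed]
-- 		for move in full:
-- 			subs = {move[i:j] for i in range(move_length) for j in range(i + 1, move_length + 1)}
-- 			score = sum(1 for s in subs if s not in known)
-- 			if score > best_score:
-- 				best_move = move
-- 				best_score = score
-- 	return '  Best move: %s [score: %i]' % (best_move, best_score)
-- ===== Notes on version B (the rewrite author's own statement) =====
-- stated objective: alternative
-- what changed: Instead of scoring every move of length <= L against every other enumerated move (A's quadratic scan over the 4^L-sized move list), B enumerates only the full-length moves and scores each directly as the number of its distinct contiguous substrings not in char_moves (a set).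
import Mathlib
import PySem

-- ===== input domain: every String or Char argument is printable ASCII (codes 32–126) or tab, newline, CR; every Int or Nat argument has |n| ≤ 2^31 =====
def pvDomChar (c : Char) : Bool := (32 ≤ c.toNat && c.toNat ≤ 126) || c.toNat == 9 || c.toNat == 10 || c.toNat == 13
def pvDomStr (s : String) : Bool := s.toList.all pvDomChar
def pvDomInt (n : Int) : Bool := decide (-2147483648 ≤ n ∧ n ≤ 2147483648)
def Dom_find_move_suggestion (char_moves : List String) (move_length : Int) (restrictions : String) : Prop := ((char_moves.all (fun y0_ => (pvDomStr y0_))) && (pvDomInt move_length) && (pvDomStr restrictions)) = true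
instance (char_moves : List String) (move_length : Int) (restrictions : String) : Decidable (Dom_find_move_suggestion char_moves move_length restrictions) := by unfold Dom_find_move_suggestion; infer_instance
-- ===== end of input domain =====

-- B replaces A's quadratic scan of all ≤-length moves against each other by scoring each full-length
-- move directly via the set of its distinct contiguous substrings (the same count, by a different route).
-- Strings are ported as lists of code points (List Char), the PySem convention.

-- ===== PORT A =====
-- list_all_moves_leq_recur: the mutated 'arr' becomes an accumulator that is returned
def pvListAllRecur (restr : List Char) (moveSoFar : List Char) (lengthToAdd : Int)
    (arr : List (List Char)) : List (List Char) :=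
  let arr := if moveSoFar.length > 0 then arr ++ [moveSoFar] else arr
  if lengthToAdd > 0 then
    let arr := if 'u' ∉ restr then pvListAllRecur restr (moveSoFar ++ ['u']) (lengthToAdd - 1) arr else arr
    let arr := if 'd' ∉ restr then pvListAllRecur restr (moveSoFar ++ ['d']) (lengthToAdd - 1) arr else arr
    let arr := if 'l' ∉ restr then pvListAllRecur restr (moveSoFar ++ ['l']) (lengthToAdd - 1) arr else arr
    if 'r' ∉ restr then pvListAllRecur restr (moveSoFar ++ ['r']) (lengthToAdd - 1) arr else arr
  else arr
termination_by lengthToAdd.toNat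
decreasing_by all_goals omega

-- the inner 'for j in range(0, len(all_moves))' loop (score accumulation), named for the proofs
def pvScoreLoopA (all_moves : List (List Char)) (cms : List (List Char)) (move : List Char) : Int :=
  (PySem.List.pyRange 0 (PySem.List.len all_moves) 1).foldl (fun score j =>
    let move_part := PySem.List.pyGetD all_moves j []
    if PySem.Chars.isIn move_part move = true ∧ move_part ∉ cms then score + 1 else score) 0

-- the outer 'for i in range(0, len(all_moves))' loop over (best_move, best_score)
def pvBestLoopA (all_moves : List (List Char)) (cms : List (List Char)) (move_length : Int) :
    Option (List Char) × Int :=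
  (PySem.List.pyRange 0 (PySem.List.len all_moves) 1).foldl (fun st i =>
    let move := PySem.List.pyGetD all_moves i []
    let score : Int := if (move.length : Int) = move_length then pvScoreLoopA all_moves cms move else 0
    if score > st.2 then (some move, score) else st) (none, 0)

def find_move_suggestion (char_moves : List String) (move_length : Int) (restrictions : String) : String :=
  let restr := restrictions.toList
  let cms := char_moves.map String.toList
  if 'u' ∈ restr ∧ 'd' ∈ restr ∧ 'l' ∈ restr ∧ 'r' ∈ restr then
    "  No moves possible!"
  else
    let res := pvBestLoopA (pvListAllRecur restr [] move_length []) cms move_length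
    "  Best move: " ++ (match res.1 with | none => "None" | some m => String.ofList m) ++
      " [score: " ++ PySem.Int.toStr res.2 ++ "]"

-- ===== PORT B =====
-- score of one full move: its distinct contiguous substrings not in 'known'
def pvScoreB (known : PySem.Set (List Char)) (move_length : Int) (move : List Char) : Int :=
  let subs : PySem.Set (List Char) := PySem.Set.ofList
    ((PySem.List.pyRange 0 move_length 1).flatMap (fun i =>
      (PySem.List.pyRange (i + 1) (move_length + 1) 1).map (fun j =>
        PySem.List.slice move (some i) (some j))))
  subs.foldl (fun acc s => if s ∉ known then acc + 1 else acc) 0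

-- build the full-length moves by repeated one-letter extension, then take the best-scoring one
def pvBestLoopB (allowed : List Char) (known : PySem.Set (List Char)) (move_length : Int) :
    Option (List Char) × Int :=
  if move_length > 0 then
    let full := (PySem.List.pyRange 0 move_length 1).foldl
      (fun l _ => l.flatMap (fun m => allowed.map (fun c => m ++ [c]))) [([] : List Char)]
    full.foldl (fun st move =>
      let score := pvScoreB known move_length move
      if score > st.2 then (some move, score) else st) (none, 0)
  else (none, 0)

def find_move_suggestion_alt (char_moves : List String) (move_length : Int) (restrictions : String) : String :=
  let allowed := "udlr".toList.filter (fun c => c ∉ restrictions.toList)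
  if allowed = [] then
    "  No moves possible!"
  else
    let res := pvBestLoopB allowed (PySem.Set.ofList (char_moves.map String.toList)) move_length
    "  Best move: " ++ (match res.1 with | none => "None" | some m => String.ofList m) ++
      " [score: " ++ PySem.Int.toStr res.2 ++ "]"

-- ===== PRECONDITION & SPEC =====
-- Pre_ excludes move_length >= 996 when at least one direction is unrestricted: there A recurses
-- move_length deep and raises RecursionError under CPython's default recursion limit of 1000
-- (onset measured at 996 from a top-level call); with all four directions restricted A returns
-- early without recursing, so those inputs stay inside Pre_.
def Pre_find_move_suggestion (char_moves : List String) (move_length : Int) (restrictions : String) : Prop :=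
  move_length < 996 ∨ ('u' ∈ restrictions.toList ∧ 'd' ∈ restrictions.toList ∧
    'l' ∈ restrictions.toList ∧ 'r' ∈ restrictions.toList)
instance (char_moves : List String) (move_length : Int) (restrictions : String) : Decidable (Pre_find_move_suggestion char_moves move_length restrictions) := by unfold Pre_find_move_suggestion; infer_instance
def pvWitness_find_move_suggestion : List String × Int × String := (["u"], 2, "lr")

def Spec_find_move_suggestion (char_moves : List String) (move_length : Int) (restrictions : String) (out : String) : Prop := out = find_move_suggestion_alt char_moves move_length restrictions
instance (char_moves : List String) (move_length : Int) (restrictions : String) (out : String) : Decidable (Spec_find_move_suggestion char_moves move_length restrictions out) := by unfold Spec_find_move_suggestion; infer_instance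

-- ===== CLAIM (what is proved, stated in full; the proofs are below) =====
def Claim_equal_find_move_suggestion : Prop := ∀ (char_moves : List String) (move_length : Int) (restrictions : String), Dom_find_move_suggestion char_moves move_length restrictions → Pre_find_move_suggestion char_moves move_length restrictions → Spec_find_move_suggestion char_moves move_length restrictions (find_move_suggestion char_moves move_length restrictions)

-- ===== LEMMAS AND PROOFS =====

-- allowed alphabet, in u,d,l,r order
def pvAllowed (restr : List Char) : List Char := ['u','d','l','r'].filter (fun c => c ∉ restr)

-- the list of strings appended by list_all_moves_leq_recur(ms, k, restr, ·), Nat fuel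
def pvEmit (restr : List Char) (ms : List Char) : Nat → List (List Char)
  | 0 => if ms.length > 0 then [ms] else []
  | n + 1 => (if ms.length > 0 then [ms] else []) ++
      (pvAllowed restr).flatMap (fun c => pvEmit restr (ms ++ [c]) n)

-- the full-length moves below prefix ms with n letters to add, DFS order
def pvFull (restr : List Char) (ms : List Char) : Nat → List (List Char)
  | 0 => [ms]
  | n + 1 => (pvAllowed restr).flatMap (fun c => pvFull restr (ms ++ [c]) n)

theorem pvListAllRecur_eq (restr : List Char) : ∀ (n : Nat) (ms : List Char) (k : Int)
    (arr : List (List Char)), k.toNat = n →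
    pvListAllRecur restr ms k arr = arr ++ pvEmit restr ms n := by
  intro n
  induction n with
  | zero =>
    intro ms k arr hk
    rw [pvListAllRecur]
    have hk0 : ¬ k > 0 := by omega
    simp only [hk0, if_false, pvEmit]
    split <;> simp
  | succ m ih =>
    intro ms k arr hk
    rw [pvListAllRecur]
    have hkpos : k > 0 := by omega
    have hk1 : (k - 1).toNat = m := by omega
    simp only [hkpos, if_true, pvEmit]
    by_cases hu : 'u' ∈ restr <;> by_cases hd : 'd' ∈ restr <;>
      by_cases hl : 'l' ∈ restr <;> by_cases hr : 'r' ∈ restr <;>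
      simp [hu, hd, hl, hr, pvAllowed, ih _ _ _ hk1] <;> split <;> simp

theorem mem_pvEmit (restr : List Char) : ∀ (n : Nat) (ms s : List Char),
    s ∈ pvEmit restr ms n ↔
      ∃ t, s = ms ++ t ∧ t.length ≤ n ∧ s ≠ [] ∧ ∀ c ∈ t, c ∈ pvAllowed restr := by
  intro n
  induction n with
  | zero =>
    intro ms s
    constructor
    · intro h
      have hs : s = ms ∧ ms.length > 0 := by
        simp only [pvEmit] at h; split at h <;> simp_all
      exact ⟨[], by simp [hs.1], by simp,
        by rw [hs.1]; exact List.length_pos_iff.mp hs.2, by simp⟩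
    · rintro ⟨t, hst, hlen, hne, -⟩
      have ht : t = [] := List.eq_nil_of_length_eq_zero (by omega)
      subst ht
      have hms : s = ms := by simpa using hst
      have hpos : 0 < ms.length := by rw [← hms]; exact List.length_pos_iff.mpr hne
      simp [pvEmit, hpos, hms]
  | succ m ih =>
    intro ms s
    simp only [pvEmit, List.mem_append, List.mem_flatMap]
    constructor
    · rintro (h | ⟨c, hc, hmem⟩)
      · have hs : s = ms ∧ ms.length > 0 := by split at h <;> simp_all
        exact ⟨[], by simp [hs.1], by simp,
          by rw [hs.1]; exact List.length_pos_iff.mp hs.2, by simp⟩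
      · obtain ⟨t', ht', hlen, hne, hall⟩ := (ih _ _).1 hmem
        refine ⟨c :: t', by simp [ht'], by simp; omega, hne, ?_⟩
        intro x hx
        rcases List.mem_cons.1 hx with h | h
        · subst h; exact hc
        · exact hall x h
    · rintro ⟨t, hst, hlen, hne, hall⟩
      cases t with
      | nil =>
        left
        have hms : s = ms := by simpa using hst
        have hpos : 0 < ms.length := by rw [← hms]; exact List.length_pos_iff.mpr hne
        simp [hpos, hms]
      | cons c t' =>
        right
        refine ⟨c, hall c (by simp), (ih _ _).2 ⟨t', by simp [hst], by
          simp at hlen; omega, hne, fun x hx => hall x (by simp [hx])⟩⟩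

theorem nodup_pvEmit (restr : List Char) : ∀ (n : Nat) (ms : List Char),
    (pvEmit restr ms n).Nodup := by
  intro n
  induction n with
  | zero =>
    intro ms; simp only [pvEmit]; split <;> simp
  | succ m ih =>
    intro ms
    simp only [pvEmit]
    rw [List.nodup_append]
    refine ⟨by split <;> simp, ?_, ?_⟩
    · rw [List.nodup_flatMap]
      refine ⟨fun c _ => ih _, ?_⟩
      have hnd : (pvAllowed restr).Nodup := List.Nodup.filter _ (by decide)
      refine (List.Pairwise.imp ?_ hnd)
      intro c c' hne s hs hs'
      obtain ⟨t, hst, -, -, -⟩ := (mem_pvEmit restr m (ms ++ [c]) s).1 hs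
      obtain ⟨t', hst', -, -, -⟩ := (mem_pvEmit restr m (ms ++ [c']) s).1 hs'
      rw [hst'] at hst
      simp only [List.append_assoc, List.singleton_append] at hst
      have h2 := List.append_cancel_left hst
      have : c' = c := (List.cons.injEq _ _ _ _ ▸ h2).1
      exact hne this.symm
    · intro s hs u hu
      have hsms : s = ms := by
        by_cases h : ms.length > 0
        · rw [if_pos h] at hs; simpa using hs
        · rw [if_neg h] at hs; simp at hs
      obtain ⟨c, -, hmem⟩ := List.mem_flatMap.1 hu
      obtain ⟨t, hut, -, -, -⟩ := (mem_pvEmit restr m (ms ++ [c]) u).1 hmem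
      intro hsu
      have : ms.length = ms.length + 1 + t.length := by
        calc ms.length = u.length := by rw [← hsu, hsms]
        _ = (ms ++ [c] ++ t).length := by rw [hut]
        _ = ms.length + 1 + t.length := by simp only [List.length_append, List.length_cons, List.length_nil]
      omega

theorem filter_pvEmit (restr : List Char) : ∀ (n : Nat) (ms : List Char),
    0 < ms.length + n →
    (pvEmit restr ms n).filter (fun s => s.length = ms.length + n) = pvFull restr ms n := by
  intro n
  induction n with
  | zero =>
    intro ms h
    have : ms.length > 0 := by omega
    simp [pvEmit, pvFull, this, List.filter]
  | succ m ih =>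
    intro ms _
    simp only [pvEmit, pvFull, List.filter_append]
    have h1 : (if ms.length > 0 then [ms] else []).filter
        (fun s => s.length = ms.length + (m + 1)) = [] := by
      split <;> simp [List.filter]
    rw [h1, List.nil_append, List.filter_flatMap]
    apply List.flatMap_congr
    intro c _
    have h2 : ((pvEmit restr (ms ++ [c]) m).filter
          (fun s => s.length = ms.length + (m + 1)))
        = ((pvEmit restr (ms ++ [c]) m).filter
          (fun s => s.length = (ms ++ [c]).length + m)) := by
      apply List.filter_congr
      intro s _
      rw [decide_eq_decide]
      simp only [List.length_append, List.length_cons, List.length_nil]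
      constructor <;> omega
    rw [h2, ih (ms ++ [c]) (by simp)]

theorem mem_pvFull (restr : List Char) : ∀ (n : Nat) (ms s : List Char),
    s ∈ pvFull restr ms n → ∃ t, s = ms ++ t ∧ t.length = n ∧ ∀ c ∈ t, c ∈ pvAllowed restr := by
  intro n
  induction n with
  | zero =>
    intro ms s hs
    simp only [pvFull, List.mem_singleton] at hs
    exact ⟨[], by simp [hs], by simp, by simp⟩
  | succ m ih =>
    intro ms s hs
    simp only [pvFull, List.mem_flatMap] at hs
    obtain ⟨c, hc, hmem⟩ := hs
    obtain ⟨t, hst, hlen, hall⟩ := ih _ _ hmem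
    refine ⟨c :: t, by simp [hst], by simp [hlen], ?_⟩
    intro x hx
    rcases List.mem_cons.1 hx with h | h
    · subst h; exact hc
    · exact hall x h

def pvStep (allowed : List Char) (l : List (List Char)) : List (List Char) :=
  l.flatMap (fun m => allowed.map (fun c => m ++ [c]))

theorem pv_foldl_const_iterate {α β : Type} (f : α → α) (l : List β) (init : α) :
    l.foldl (fun acc _ => f acc) init = f^[l.length] init := by
  induction l generalizing init with
  | nil => rfl
  | cons x xs ih => simp [List.foldl_cons, ih, Function.iterate_succ_apply]

theorem pvStep_append (al : List Char) (l1 l2 : List (List Char)) :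
    pvStep al (l1 ++ l2) = pvStep al l1 ++ pvStep al l2 := by
  simp [pvStep]

theorem pvStep_iter_nil (al : List Char) (n : Nat) : (pvStep al)^[n] [] = [] := by
  induction n with
  | zero => rfl
  | succ m ih => rw [Function.iterate_succ_apply]; simpa [pvStep] using ih

theorem pvStep_iter_append (al : List Char) :
    ∀ (n : Nat) (l1 l2 : List (List Char)), (pvStep al)^[n] (l1 ++ l2)
      = (pvStep al)^[n] l1 ++ (pvStep al)^[n] l2 := by
  intro n
  induction n with
  | zero => intro l1 l2; rfl
  | succ m ihn =>
    intro l1 l2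
    rw [Function.iterate_succ_apply, Function.iterate_succ_apply,
      Function.iterate_succ_apply, pvStep_append]
    exact ihn (pvStep al l1) (pvStep al l2)

theorem pvStep_iter_flatMap (al : List Char) (n : Nat) (g : Char → List (List Char)) :
    ∀ (xs : List Char), (pvStep al)^[n] (xs.flatMap g) = xs.flatMap (fun c => (pvStep al)^[n] (g c)) := by
  intro xs
  induction xs with
  | nil => simp [pvStep_iter_nil]
  | cons x xs ih =>
    simp only [List.flatMap_cons, pvStep_iter_append, ih]

theorem pvStep_iter_full (restr : List Char) : ∀ (n : Nat) (ms : List Char),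
    (pvStep (pvAllowed restr))^[n] [ms] = pvFull restr ms n := by
  intro n
  induction n with
  | zero => intro ms; rfl
  | succ m ih =>
    intro ms
    rw [Function.iterate_succ_apply]
    have h1 : pvStep (pvAllowed restr) [ms] = (pvAllowed restr).flatMap (fun c => [ms ++ [c]]) := by
      simp only [pvStep, List.flatMap_cons, List.flatMap_nil, List.append_nil]
      induction pvAllowed restr with
      | nil => rfl
      | cons x xs ihx => simp_all
    rw [h1, pvStep_iter_flatMap]
    simp only [pvFull]
    exact List.flatMap_congr (fun c _ => ih (ms ++ [c]))

theorem pv_mem_slices (L : Int) (move s : List Char) (hL : 0 < L) (hlen : move.length = L.toNat) :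
    (s ∈ (PySem.List.pyRange 0 L 1).flatMap (fun i =>
        (PySem.List.pyRange (i + 1) (L + 1) 1).map (fun j =>
          PySem.List.slice move (some i) (some j)))) ↔ (s ≠ [] ∧ s <:+: move) := by
  constructor
  · intro h
    obtain ⟨i, hi, hmem⟩ := List.mem_flatMap.1 h
    obtain ⟨j, hj, hs⟩ := List.mem_map.1 hmem
    rw [PySem.List.mem_pyRange_one] at hi hj
    rw [PySem.List.slice_toNat move hi.1 (by omega)] at hs
    constructor
    · intro hnil
      rw [hnil] at hs
      have := congrArg List.length hs
      simp [List.length_take, List.length_drop] at this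
      omega
    · rw [← hs]
      exact ((move.drop i.toNat).take_prefix _).isInfix.trans (move.drop_suffix _).isInfix
  · rintro ⟨hne, hinf⟩
    obtain ⟨pre, suf, hps⟩ := hinf
    have hlens : pre.length + s.length + suf.length = L.toNat := by
      have h := congrArg List.length hps
      simp only [List.length_append, hlen] at h
      omega
    have hspos : 0 < s.length := List.length_pos_iff.mpr hne
    refine List.mem_flatMap.2 ⟨(pre.length : Int), ?_, List.mem_map.2
      ⟨(pre.length : Int) + (s.length : Int), ?_, ?_⟩⟩
    · rw [PySem.List.mem_pyRange_one]; omega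
    · rw [PySem.List.mem_pyRange_one]; omega
    · rw [PySem.List.slice_natCast_add]
      rw [← hps, List.append_assoc, List.drop_left, List.take_left]

-- score(A) = score(B) for any full-length move over the allowed alphabet
theorem pv_score_eq (restr : List Char) (cms : List (List Char)) (L : Int) (n : Nat)
    (move : List Char) (hL : 0 < L) (hn : L.toNat = n) (hmlen : move.length = n)
    (hchars : ∀ c ∈ move, c ∈ pvAllowed restr) :
    ((pvEmit restr [] n).countP
        (fun mp => decide (PySem.Chars.isIn mp move = true ∧ mp ∉ cms)) : Int)
    = ((PySem.Set.ofList ((PySem.List.pyRange 0 L 1).flatMap (fun i =>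
          (PySem.List.pyRange (i + 1) (L + 1) 1).map (fun j =>
            PySem.List.slice move (some i) (some j))))).countP
        (fun s => decide (s ∉ cms)) : Int) := by
  rw [List.countP_eq_length_filter, List.countP_eq_length_filter]
  have key : ((pvEmit restr [] n).filter
        (fun mp => decide (PySem.Chars.isIn mp move = true ∧ mp ∉ cms))).length
      = ((PySem.Set.ofList ((PySem.List.pyRange 0 L 1).flatMap (fun i =>
            (PySem.List.pyRange (i + 1) (L + 1) 1).map (fun j =>
              PySem.List.slice move (some i) (some j))))).filter
          (fun s => decide (s ∉ cms))).length := by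
    apply List.Perm.length_eq
    apply (List.perm_ext_iff_of_nodup
      ((nodup_pvEmit restr n []).filter _) ((PySem.Set.nodup_ofList _).filter _)).2
    intro s
    simp only [List.mem_filter, decide_eq_true_eq]
    rw [mem_pvEmit, PySem.Set.mem_ofList, pv_mem_slices L move s hL (by omega)]
    constructor
    · rintro ⟨⟨t, hst, hlen, hne, hall⟩, hin, hnm⟩
      exact ⟨⟨hne, (PySem.Chars.isIn_iff_infix _ _).1 hin⟩, hnm⟩
    · rintro ⟨⟨hne, hinf⟩, hnm⟩
      refine ⟨⟨s, by simp, ?_, hne, ?_⟩, ?_, hnm⟩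
      · have := hinf.sublist.length_le
        omega
      · intro c hc
        exact hchars c (hinf.sublist.subset hc)
      · exact (PySem.Chars.isIn_iff_infix _ _).2 hinf
  exact_mod_cast key

-- a move of the wrong length scores 0 and never updates the best pair (whose score stays ≥ 0)
theorem pvFoldBest (S : List Char → Int) (L : Int) :
    ∀ (l : List (List Char)) (st : Option (List Char) × Int), 0 ≤ st.2 →
    l.foldl (fun st move =>
        if (if (move.length : Int) = L then S move else 0) > st.2
        then (some move, if (move.length : Int) = L then S move else 0) else st) st
    = (l.filter (fun m => decide ((m.length : Int) = L))).foldl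
        (fun st move => if S move > st.2 then (some move, S move) else st) st := by
  intro l
  induction l with
  | nil => intro st _; rfl
  | cons m l ih =>
    intro st hst
    rw [List.filter_cons]
    by_cases hm : (m.length : Int) = L
    · rw [if_pos (by simpa using hm), List.foldl_cons, List.foldl_cons]
      have hred : (if (m.length : Int) = L then S m else 0) = S m := if_pos hm
      rw [hred]
      by_cases hgt : S m > st.2
      · rw [if_pos hgt]
        exact ih _ (by show (0 : Int) ≤ S m; omega)
      · rw [if_neg hgt]; exact ih _ hst
    · rw [if_neg (by simpa using hm), List.foldl_cons]
      have hred : (if (m.length : Int) = L then S m else 0) = 0 := if_neg hm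
      rw [hred]
      rw [if_neg (show ¬ ((0 : Int) > st.2) by omega)]
      exact ih _ hst

theorem pvAllowed_nil_iff (restr : List Char) :
    pvAllowed restr = [] ↔ ('u' ∈ restr ∧ 'd' ∈ restr ∧ 'l' ∈ restr ∧ 'r' ∈ restr) := by
  by_cases hu : 'u' ∈ restr <;> by_cases hd : 'd' ∈ restr <;>
    by_cases hl : 'l' ∈ restr <;> by_cases hr : 'r' ∈ restr <;>
    simp [pvAllowed, hu, hd, hl, hr]

theorem pv_score_loops_eq (restr : List Char) (cms : List (List Char)) (L : Int) (n : Nat)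
    (hL : 0 < L) (hn : L.toNat = n) :
    ∀ move ∈ pvFull restr [] n,
      pvScoreLoopA (pvEmit restr [] n) cms move = pvScoreB (PySem.Set.ofList cms) L move := by
  intro move hm
  obtain ⟨t, hmt, hlen, hall⟩ := mem_pvFull restr n [] move hm
  have hmt' : move = t := by simpa using hmt
  subst hmt'
  unfold pvScoreLoopA pvScoreB
  simp only [PySem.List.len_eq]
  rw [PySem.List.foldl_pyRange_zero_pyGetD' (pvEmit restr [] n) []
    (fun score mp => if PySem.Chars.isIn mp move = true ∧ mp ∉ cms then score + 1 else score) 0]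
  rw [PySem.List.foldl_ite_add_one, PySem.List.foldl_ite_add_one]
  have hc : (PySem.Set.ofList ((PySem.List.pyRange 0 L 1).flatMap (fun i =>
        (PySem.List.pyRange (i + 1) (L + 1) 1).map (fun j =>
          PySem.List.slice move (some i) (some j))))).countP
        (fun s => decide (s ∉ PySem.Set.ofList cms))
      = (PySem.Set.ofList ((PySem.List.pyRange 0 L 1).flatMap (fun i =>
        (PySem.List.pyRange (i + 1) (L + 1) 1).map (fun j =>
          PySem.List.slice move (some i) (some j))))).countP
        (fun s => decide (s ∉ cms)) := by
    apply List.countP_congr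
    intro x _
    simp [PySem.Set.mem_ofList]
  rw [hc, pv_score_eq restr cms L n move hL hn hlen hall]

theorem pv_best_eq (restr : List Char) (cms : List (List Char)) (L : Int) :
    pvBestLoopA (pvListAllRecur restr [] L []) cms L
    = pvBestLoopB (pvAllowed restr) (PySem.Set.ofList cms) L := by
  by_cases hL : L > 0
  · have hn : L.toNat = L.toNat := rfl
    have hnpos : 0 < L.toNat := by omega
    have hAM : pvListAllRecur restr [] L [] = pvEmit restr [] L.toNat := by
      simpa using pvListAllRecur_eq restr L.toNat [] L [] rfl
    rw [hAM]
    unfold pvBestLoopA pvBestLoopB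
    rw [if_pos hL]
    simp only [PySem.List.len_eq]
    rw [PySem.List.foldl_pyRange_zero_pyGetD' (pvEmit restr [] L.toNat) []
      (fun st move =>
        if (if (move.length : Int) = L then pvScoreLoopA (pvEmit restr [] L.toNat) cms move else 0) > st.2
        then (some move, if (move.length : Int) = L then pvScoreLoopA (pvEmit restr [] L.toNat) cms move else 0)
        else st) (none, 0)]
    rw [pvFoldBest (fun move => pvScoreLoopA (pvEmit restr [] L.toNat) cms move) L _ _ (by norm_num)]
    have hfilt : (pvEmit restr [] L.toNat).filter (fun m => decide ((m.length : Int) = L))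
        = pvFull restr [] L.toNat := by
      rw [← filter_pvEmit restr L.toNat [] (by simpa using hnpos)]
      apply List.filter_congr
      intro s _
      rw [decide_eq_decide]
      simp only [List.length_nil, Nat.zero_add]
      omega
    rw [hfilt]
    rw [show (fun (l : List (List Char)) (_ : Int) =>
        l.flatMap (fun m => (pvAllowed restr).map (fun c => m ++ [c])))
      = (fun (l : List (List Char)) (_ : Int) => pvStep (pvAllowed restr) l) from rfl]
    rw [pv_foldl_const_iterate (pvStep (pvAllowed restr))]
    have hlenr : (PySem.List.pyRange 0 L 1).length = L.toNat := by
      rw [PySem.List.length_pyRange_one]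
      omega
    rw [hlenr, pvStep_iter_full restr L.toNat []]
    apply PySem.List.foldl_congr_mem
    intro acc x hx
    rw [pv_score_loops_eq restr cms L L.toNat hL rfl x hx]
  · unfold pvBestLoopB
    rw [if_neg hL]
    have hAM : pvListAllRecur restr [] L [] = [] := by
      have h := pvListAllRecur_eq restr 0 [] L [] (by omega)
      simpa [pvEmit] using h
    rw [hAM]
    rfl

-- ===== VERDICT (by name: the statement is the Claim_ definition above) =====
theorem find_move_suggestion_spec : Claim_equal_find_move_suggestion := by
  intro char_moves L restrictions _ _
  unfold Spec_find_move_suggestion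
  simp only [find_move_suggestion, find_move_suggestion_alt]
  have hallow : "udlr".toList.filter (fun c => decide (c ∉ restrictions.toList))
      = pvAllowed restrictions.toList := rfl
  rw [hallow]
  by_cases hall : 'u' ∈ restrictions.toList ∧ 'd' ∈ restrictions.toList ∧
      'l' ∈ restrictions.toList ∧ 'r' ∈ restrictions.toList
  · rw [if_pos hall, if_pos ((pvAllowed_nil_iff _).2 hall)]
  · rw [if_neg hall, if_neg (fun h => hall ((pvAllowed_nil_iff _).1 h)), pv_best_eq]
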